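-- pv_equiv track=rewrite | github.com/Santhosh-Suresh/leetcoder | min_deviation_1675.py | odderize
-- ===== SOURCE A (Python) =====
-- def odderize(nums):
--     new_nums = []
--     for item in nums:
--         if item %2 == 0:
--             new_nums.append(item//2)
--         else:
--             return nums
--     return new_nums
-- ===== SOURCE B (Python) =====
-- def odderize(nums):
--     if all(x % 2 == 0 for x in nums):
--         return [x // 2 for x in nums]
--     return nums
-- ===== Notes on version B (the rewrite author's own statement) =====
-- stated objective: simpler
-- what changed: Replaces A's fused loop (build halved list while scanning, early-return original on first odd) with two separate passes: an all()-evenness check followed by a list comprehension.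
import Mathlib
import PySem

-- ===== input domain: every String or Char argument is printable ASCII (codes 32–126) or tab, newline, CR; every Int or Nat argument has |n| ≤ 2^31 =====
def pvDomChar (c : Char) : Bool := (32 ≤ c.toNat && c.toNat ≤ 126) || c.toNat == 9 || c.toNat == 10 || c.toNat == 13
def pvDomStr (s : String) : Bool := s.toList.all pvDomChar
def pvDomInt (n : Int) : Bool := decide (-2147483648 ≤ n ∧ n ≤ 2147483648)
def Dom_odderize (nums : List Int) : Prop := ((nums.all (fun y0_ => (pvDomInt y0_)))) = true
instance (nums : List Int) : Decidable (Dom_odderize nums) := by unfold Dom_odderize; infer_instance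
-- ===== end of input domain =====

-- B: separate evenness check then halving map, instead of A's fused build-and-early-return loop (simpler decomposition).
-- ===== PORT A =====
-- helper: A's loop over the remaining items with accumulator new_nums; returns the original nums on the first odd item
def odderizeGo (nums : List Int) : List Int → List Int → List Int
  | acc, [] => acc
  | acc, item :: rest =>
      if PySem.Int.mod item 2 = 0 then odderizeGo nums (acc ++ [PySem.Int.floordiv item 2]) rest
      else nums

def odderize (nums : List Int) : List Int := odderizeGo nums [] nums

-- ===== PORT B =====
def odderize_alt (nums : List Int) : List Int :=
  if nums.all (fun x => PySem.Int.mod x 2 == 0) then nums.map (fun x => PySem.Int.floordiv x 2)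
  else nums

-- ===== PRECONDITION & SPEC =====
def Spec_odderize (nums : List Int) (out : List Int) : Prop := out = odderize_alt nums
instance (nums : List Int) (out : List Int) : Decidable (Spec_odderize nums out) := by unfold Spec_odderize; infer_instance

-- ===== CLAIM (what is proved, stated in full; the proofs are below) =====
def Claim_equal_odderize : Prop := ∀ (nums : List Int), Dom_odderize nums → Spec_odderize nums (odderize nums)

-- ===== LEMMAS AND PROOFS =====

-- ===== VERDICT (by name: the statement is the Claim_ definition above) =====
theorem odderizeGo_eq (nums : List Int) (rest acc : List Int) :
    odderizeGo nums acc rest =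
      if rest.all (fun x => PySem.Int.mod x 2 == 0) then acc ++ rest.map (fun x => PySem.Int.floordiv x 2)
      else nums := by
  induction rest generalizing acc with
  | nil => simp [odderizeGo]
  | cons h t ih =>
      by_cases he : PySem.Int.mod h 2 = 0
      · have hb : (PySem.Int.mod h 2 == 0) = true := by rw [beq_iff_eq]; exact he
        simp only [odderizeGo, if_pos he, ih, List.all_cons, List.map_cons, hb,
          Bool.true_and, List.append_assoc, List.singleton_append]
      · have hb : (PySem.Int.mod h 2 == 0) = false := by rw [beq_eq_false_iff_ne]; exact he
        simp only [odderizeGo, if_neg he, List.all_cons, hb, Bool.false_and,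
          Bool.false_eq_true, if_false]

-- ===== VERDICT =====
theorem odderize_spec : Claim_equal_odderize := by
  intro nums _
  unfold Spec_odderize odderize odderize_alt
  rw [odderizeGo_eq]
  simp
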